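-- pv_equiv track=rewrite | github.com/siramk/DS501 | src/q1_4/q2.py | multi_intersect
-- ===== SOURCE A (Python) =====
-- def intersect(p1, p2):
-- 	i = 0
-- 	j = 0
-- 	answer = []
-- 	while i < len(p1) and j < len(p2):
-- 		if p1[i] == p2[j]:
-- 			answer.append(p1[i])
-- 			i += 1
-- 			j += 1
-- 		elif p1[i] < p2[j]:
-- 			i += 1
-- 		else:
-- 			j += 1
-- 	return answer
--
-- def multi_intersect(terms, postings):
-- 	mul_list = []
-- 	result = []
-- 	for term in terms:
-- 		if term in postings:
-- 			mul_list.append(postings[term])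
-- 		else:
-- 			return result
-- 	mul_list.sort(key=len, reverse=True)
-- 	result = mul_list[0]
-- 	for lis in mul_list[1:]:
-- 		if len(result) == 0:
-- 			return result
-- 		result = intersect(result, lis)
-- 	return result
-- ===== SOURCE B (Python) =====
-- def multi_intersect(terms, postings):
--     lists = []
--     for term in terms:
--         plist = postings.get(term)
--         if plist is None:
--             return []
--         lists.append(plist)
--     sets = [set(l) for l in lists]
--     smallest = min(lists, key=len)
--     return [x for x in smallest if all(x in s for s in sets)]
-- ===== Notes on version B (the rewrite author's own statement) =====
-- stated objective: simpler
-- what changed: Instead of sorting the collected lists by length and folding a hand-written two-pointer merge intersection from the largest list, B builds a hash set per list once and returns the elements of the shortest list that belong to every set.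
-- outside the precondition, e.g. on multi_intersect(['a', 'b'], {'a': [2, 1], 'b': [1, 2]}): A returns [2], B returns [2, 1]
import Mathlib
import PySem

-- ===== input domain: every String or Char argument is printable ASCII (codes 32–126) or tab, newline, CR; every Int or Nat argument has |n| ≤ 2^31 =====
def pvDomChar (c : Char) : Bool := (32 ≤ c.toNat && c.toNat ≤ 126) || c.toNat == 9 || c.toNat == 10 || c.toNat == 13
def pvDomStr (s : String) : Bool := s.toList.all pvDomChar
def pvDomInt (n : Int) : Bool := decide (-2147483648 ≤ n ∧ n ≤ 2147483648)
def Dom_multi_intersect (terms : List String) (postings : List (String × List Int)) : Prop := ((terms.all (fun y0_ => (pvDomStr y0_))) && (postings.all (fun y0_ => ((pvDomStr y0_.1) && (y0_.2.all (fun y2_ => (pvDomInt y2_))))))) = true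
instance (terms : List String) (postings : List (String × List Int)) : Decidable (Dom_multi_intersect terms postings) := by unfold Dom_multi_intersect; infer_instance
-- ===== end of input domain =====

-- B replaces A's length-sort + chained two-pointer merges by one filter of the smallest
-- postings list through hash sets built once per list (objective: a simpler, set-based algorithm).


-- ===== PORT A =====
-- intersect(p1, p2): the two-pointer merge, consuming heads instead of moving indices
def pvIntersectA : List Int → List Int → List Int
  | [], _ => []
  | _ :: _, [] => []
  | a :: as, b :: bs =>
    if a = b then a :: pvIntersectA as bs
    else if a < b then pvIntersectA as (b :: bs)
    else pvIntersectA (a :: as) bs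
  termination_by p1 p2 => p1.length + p2.length
  decreasing_by all_goals (simp only [List.length_cons]; omega)

-- first loop of A: collect postings[term]; none = the early 'return result' ([])
def pvCollectA (d : PySem.Dict String (List Int)) : List String → Option (List (List Int))
  | [] => some []
  | t :: ts =>
    if PySem.Dict.contains d t then
      match pvCollectA d ts with
      | some rest => some (PySem.Dict.getD d t [] :: rest)
      | none => none
    else none

-- second loop of A: fold intersect over the remaining lists, early return on empty
def pvChainA : List Int → List (List Int) → List Int
  | result, [] => result
  | result, lis :: rest =>
    if result.length = 0 then result else pvChainA (pvIntersectA result lis) rest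

def multi_intersect (terms : List String) (postings : List (String × List Int)) : List Int :=
  match pvCollectA (PySem.Dict.mk postings) terms with
  | none => []
  | some mul_list =>
    match PySem.List.sorted mul_list (fun l => l.length) true with
    | [] => []  -- Python raises IndexError (mul_list[0]) here: terms = [], excluded by Pre_
    | r :: rest => pvChainA r rest

-- ===== PORT B =====
-- B's first loop: postings.get(term); None → return []
def pvGatherB (d : PySem.Dict String (List Int)) : List String → Option (List (List Int))
  | [] => some []
  | t :: ts =>
    match PySem.Dict.get? d t with
    | none => none
    | some v => (pvGatherB d ts).map (v :: ·)

def multi_intersect_alt (terms : List String) (postings : List (String × List Int)) : List Int :=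
  match pvGatherB (PySem.Dict.mk postings) terms with
  | none => []
  | some lists =>
    let sets := lists.map PySem.Set.ofList
    match PySem.List.min? lists (fun l => l.length) with
    | none => []  -- Python raises ValueError (min of empty) here: terms = [], excluded by Pre_
    | some smallest => smallest.filter (fun x => sets.all (fun s => PySem.Set.contains s x))

-- ===== PRECONDITION & SPEC =====
-- linear-time strict-increase check (kept Bool-valued so Pre_ evaluates fast on large inputs)
def pvStrictB : List Int → Bool
  | [] => true
  | [_] => true
  | x :: y :: l => decide (x < y) && pvStrictB (y :: l)

-- Pre_ excludes terms = [] (A raises IndexError, B raises ValueError there) and inputs where every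
-- term is present but some referenced postings list is not strictly increasing: postings lists are
-- sorted unique doc ids by the task's contract, and on unsorted lists A's two-pointer merge output
-- is an accident of the merge (when a term is absent both trivially return [], so those stay inside).
def Pre_multi_intersect (terms : List String) (postings : List (String × List Int)) : Prop :=
  terms ≠ [] ∧ (terms.any (fun t => !(PySem.Dict.mk postings).contains t)
    || terms.all (fun t => pvStrictB ((PySem.Dict.mk postings).getD t []))) = true
instance (terms : List String) (postings : List (String × List Int)) : Decidable (Pre_multi_intersect terms postings) := by unfold Pre_multi_intersect; infer_instance

def pvWitness_multi_intersect : List String × (List (String × List Int)) :=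
  (["a", "b"], [("a", [1, 3, 5]), ("b", [2, 3, 5])])

def Spec_multi_intersect (terms : List String) (postings : List (String × List Int)) (out : List Int) : Prop := out = multi_intersect_alt terms postings
instance (terms : List String) (postings : List (String × List Int)) (out : List Int) : Decidable (Spec_multi_intersect terms postings out) := by unfold Spec_multi_intersect; infer_instance

-- ===== CLAIM (what is proved, stated in full; the proofs are below) =====
def Claim_equal_multi_intersect : Prop := ∀ (terms : List String) (postings : List (String × List Int)), Dom_multi_intersect terms postings → Pre_multi_intersect terms postings → Spec_multi_intersect terms postings (multi_intersect terms postings)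

-- ===== LEMMAS AND PROOFS =====

-- pvStrictB says exactly: strictly increasing
theorem strictB_iff (l : List Int) : pvStrictB l = true ↔ l.Pairwise (· < ·) := by
  induction l using pvStrictB.induct with
  | case1 => simp [pvStrictB]
  | case2 x => simp [pvStrictB]
  | case3 x y l ih =>
    simp only [pvStrictB, Bool.and_eq_true, decide_eq_true_eq, ih, List.pairwise_cons,
      List.mem_cons]
    constructor
    · rintro ⟨hxy, hyl, hl⟩
      refine ⟨fun z hz => ?_, hyl, hl⟩
      rcases hz with rfl | hz
      · exact hxy
      · exact lt_trans hxy (hyl z hz)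
    · rintro ⟨hx, hyl, hl⟩
      exact ⟨hx y (Or.inl rfl), hyl, hl⟩

-- the two collection loops agree
theorem collect_eq_gather (d : PySem.Dict String (List Int)) (ts : List String) :
    pvCollectA d ts = pvGatherB d ts := by
  induction ts with
  | nil => rfl
  | cons t ts ih =>
    simp only [pvCollectA, pvGatherB, ← ih]
    rw [PySem.Dict.contains_eq_isSome_get?]
    cases hg : PySem.Dict.get? d t with
    | none => simp
    | some v =>
      simp only [Option.isSome_some, if_pos]
      rw [PySem.Dict.getD_of_get?_eq_some _ [] hg]
      cases pvCollectA d ts <;> simp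

-- every list gathered comes from the dict at some term
theorem gather_mem (d : PySem.Dict String (List Int)) (ts : List String) (L : List (List Int))
    (h : pvGatherB d ts = some L) : ∀ l ∈ L, ∃ t ∈ ts, d.get? t = some l := by
  induction ts generalizing L with
  | nil =>
    simp only [pvGatherB, Option.some.injEq] at h
    subst h; simp
  | cons t ts ih =>
    simp only [pvGatherB] at h
    cases hg : PySem.Dict.get? d t with
    | none => simp [hg] at h
    | some v =>
      rw [hg] at h
      cases hr : pvGatherB d ts with
      | none => simp [hr] at h
      | some L' =>
        rw [hr] at h
        simp only [Option.map_some, Option.some.injEq] at h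
        intro l hl
        rw [← h] at hl
        rcases List.mem_cons.mp hl with hl' | hl'
        · exact ⟨t, by simp, hl' ▸ hg⟩
        · obtain ⟨t', ht', hd⟩ := ih L' hr l hl'
          exact ⟨t', by simp [ht'], hd⟩

-- a successful gathering means every term is present
theorem gather_some_contains (d : PySem.Dict String (List Int)) (ts : List String)
    (L : List (List Int)) (h : pvGatherB d ts = some L) :
    ∀ t ∈ ts, d.contains t = true := by
  induction ts generalizing L with
  | nil => simp
  | cons t ts ih =>
    simp only [pvGatherB] at h
    cases hg : PySem.Dict.get? d t <;> rw [hg] at h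
    · simp at h
    · cases hr : pvGatherB d ts <;> rw [hr] at h <;> simp at h
      intro t' ht'
      rcases List.mem_cons.mp ht' with rfl | ht'
      · rw [PySem.Dict.contains_eq_isSome_get?, hg]; rfl
      · exact ih _ hr t' ht'

theorem gather_nonempty (d : PySem.Dict String (List Int)) (ts : List String) (L : List (List Int))
    (h : pvGatherB d ts = some L) (hts : ts ≠ []) : L ≠ [] := by
  cases ts with
  | nil => exact absurd rfl hts
  | cons t ts =>
    simp only [pvGatherB] at h
    cases hg : PySem.Dict.get? d t <;> rw [hg] at h
    · simp at h
    · cases hr : pvGatherB d ts <;> rw [hr] at h <;> simp at h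
      rw [← h]; simp

-- the merge intersection of two strictly increasing lists is a membership filter
theorem intersectA_eq_filter (a b : List Int) (ha : a.Pairwise (· < ·)) (hb : b.Pairwise (· < ·)) :
    pvIntersectA a b = a.filter (fun x => decide (x ∈ b)) := by
  induction a, b using pvIntersectA.induct with
  | case1 b => simp [pvIntersectA]
  | case2 x as => simp [pvIntersectA]
  | case3 as y bs ih =>
    rw [List.pairwise_cons] at ha hb
    simp only [pvIntersectA, List.filter_cons, List.mem_cons, decide_eq_true_eq,
      true_or, if_true]
    congr 1
    rw [ih ha.2 hb.2]
    apply List.filter_congr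
    intro z hz
    have hyz : y < z := ha.1 z hz
    simp only [decide_eq_decide]
    constructor
    · exact fun h => Or.inr h
    · rintro (rfl | h)
      · omega
      · exact h
  | case4 x as y bs hne hlt ih =>
    rw [List.pairwise_cons] at ha
    have hb' := List.pairwise_cons.mp hb
    have hx : x ∉ y :: bs := by
      simp only [List.mem_cons]
      rintro (h | h)
      · exact hne h
      · have := hb'.1 x h; omega
    simp only [pvIntersectA, if_neg hne, if_pos hlt]
    rw [ih ha.2 hb]
    simp only [List.filter_cons, decide_eq_true_eq]
    rw [if_neg hx]
  | case5 x as y bs hne hnlt ih =>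
    have hb' := List.pairwise_cons.mp hb
    have ha' := List.pairwise_cons.mp ha
    simp only [pvIntersectA, if_neg hne, if_neg hnlt]
    rw [ih ha hb'.2]
    apply List.filter_congr
    intro z hz
    have hyz : y < z := by
      rcases List.mem_cons.mp hz with rfl | h
      · omega
      · have := ha'.1 z h; omega
    simp only [List.mem_cons, decide_eq_decide]
    constructor
    · exact fun h => Or.inr h
    · rintro (rfl | h)
      · omega
      · exact h

-- the chained merges are one filter by membership in every remaining list
theorem chainA_eq_filter (S : List (List Int)) (r : List Int)
    (hr : r.Pairwise (· < ·)) (hS : ∀ l ∈ S, l.Pairwise (· < ·)) :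
    pvChainA r S = r.filter (fun x => decide (∀ l ∈ S, x ∈ l)) := by
  induction S generalizing r with
  | nil => simp [pvChainA]
  | cons l rest ih =>
    simp only [pvChainA]
    by_cases h0 : r.length = 0
    · rw [if_pos h0]
      rw [List.length_eq_zero_iff] at h0
      simp [h0]
    · rw [if_neg h0]
      rw [intersectA_eq_filter r l hr (hS l (by simp))]
      rw [ih _ (List.Pairwise.sublist List.filter_sublist hr) (fun l' hl' => hS l' (by simp [hl']))]
      rw [List.filter_filter]
      apply List.filter_congr
      intro z _
      have hsplit : decide (z ∈ l ∧ ∀ l' ∈ rest, z ∈ l') =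
          (decide (z ∈ l) && decide (∀ l' ∈ rest, z ∈ l')) := by simp
      simp only [List.forall_mem_cons, hsplit]
      exact Bool.and_comm _ _

-- two strictly increasing lists filtered by a predicate implying membership in both are equal
theorem filter_eq_filter_of_sorted (u v : List Int) (p : Int → Bool)
    (hu : u.Pairwise (· < ·)) (hv : v.Pairwise (· < ·))
    (hpu : ∀ x, p x = true → x ∈ u) (hpv : ∀ x, p x = true → x ∈ v) :
    u.filter p = v.filter p := by
  refine List.Perm.eq_of_pairwise (le := (· < ·)) (fun a b _ _ h h' => by omega)
    (List.Pairwise.sublist List.filter_sublist hu)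
    (List.Pairwise.sublist List.filter_sublist hv) ?_
  rw [List.perm_ext_iff_of_nodup (List.Nodup.filter _ (hu.imp ne_of_lt))
      (List.Nodup.filter _ (hv.imp ne_of_lt))]
  intro x
  simp only [List.mem_filter]
  constructor
  · rintro ⟨_, hp⟩; exact ⟨hpv x hp, hp⟩
  · rintro ⟨_, hp⟩; exact ⟨hpu x hp, hp⟩

-- ===== VERDICT (by name: the statement is the Claim_ definition above) =====
theorem multi_intersect_spec : Claim_equal_multi_intersect := by
  intro terms postings _ hpre
  obtain ⟨hne, hpre2⟩ := hpre
  unfold Spec_multi_intersect multi_intersect multi_intersect_alt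
  rw [collect_eq_gather]
  cases hg : pvGatherB (PySem.Dict.mk postings) terms with
  | none => rfl
  | some L =>
    have hall : ∀ t ∈ terms, pvStrictB ((PySem.Dict.mk postings).getD t []) = true := by
      rw [Bool.or_eq_true] at hpre2
      rcases hpre2 with hmiss | hall
      · rw [List.any_eq_true] at hmiss
        obtain ⟨t, ht, hc⟩ := hmiss
        rw [gather_some_contains _ _ _ hg t ht] at hc
        simp at hc
      · exact List.all_eq_true.mp hall
    have hsorted : ∀ t ∈ terms, ((PySem.Dict.mk postings).getD t []).Pairwise (· < ·) :=
      fun t ht => (strictB_iff _).mp (hall t ht)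
    -- every gathered list is strictly increasing
    have hLs : ∀ l ∈ L, l.Pairwise (· < ·) := by
      intro l hl
      obtain ⟨t, ht, hd⟩ := gather_mem _ _ _ hg l hl
      have := hsorted t ht
      rwa [PySem.Dict.getD_of_get?_eq_some _ [] hd] at this
    have hLne : L ≠ [] := gather_nonempty _ _ _ hg hne
    -- the shared predicate: membership in every gathered list
    have hB :
        (match PySem.List.min? L (fun l => l.length) with
          | none => []
          | some smallest =>
              smallest.filter (fun x => (L.map PySem.Set.ofList).all
                (fun s => PySem.Set.contains s x))) =
        (match PySem.List.min? L (fun l => l.length) with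
          | none => ([] : List Int)
          | some smallest => smallest.filter (fun x => decide (∀ l ∈ L, x ∈ l))) := by
      cases PySem.List.min? L (fun l => l.length) with
      | none => rfl
      | some smallest =>
        simp only []
        apply List.filter_congr
        intro x _
        rw [Bool.eq_iff_iff]
        simp [List.all_eq_true, PySem.Set.mem_ofList]
    simp only []
    rw [hB]
    cases hmin : PySem.List.min? L (fun l => l.length) with
    | none => rw [PySem.List.min?_eq_none_iff] at hmin; exact absurd hmin hLne
    | some m =>
      have hm : m ∈ L := PySem.List.min?_mem hmin
      cases hsort : PySem.List.sorted L (fun l => l.length) true with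
      | nil =>
        rw [PySem.List.sorted_eq_nil_iff] at hsort
        exact absurd hsort hLne
      | cons r rest =>
        have hperm : (r :: rest).Perm L := hsort ▸ PySem.List.sorted_perm L (fun l => l.length) true
        have hmemS : ∀ l ∈ r :: rest, l ∈ L := fun l hl => hperm.mem_iff.mp hl
        have hr : r ∈ L := hmemS r (by simp)
        show pvChainA r rest = List.filter (fun x => decide (∀ l ∈ L, x ∈ l)) m
        rw [chainA_eq_filter rest r (hLs r hr) (fun l hl => hLs l (hmemS l (by simp [hl])))]
        -- replace the tail predicate by membership in every list of L
        have hstep : r.filter (fun x => decide (∀ l ∈ rest, x ∈ l)) =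
            r.filter (fun x => decide (∀ l ∈ L, x ∈ l)) := by
          apply List.filter_congr
          intro x hx
          simp only [decide_eq_decide]
          constructor
          · intro h l hl
            rcases List.mem_cons.mp (hperm.mem_iff.mpr hl) with hl' | hl'
            · exact hl' ▸ hx
            · exact h l hl'
          · intro h l hl
            exact h l (hmemS l (by simp [hl]))
        rw [hstep]
        exact filter_eq_filter_of_sorted r m _ (hLs r hr) (hLs m hm)
          (fun x hp => by simp at hp; exact hp r hr)
          (fun x hp => by simp at hp; exact hp m hm)
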